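-- pv_equiv track=rewrite | github.com/amarjotgill/Python-mini-problems | jumble.py | jumble
-- ===== SOURCE A (Python) =====
-- def jumble(a_string, a, b):
--     l = len(a_string)
--     # new string being made
--     new_string = ''
--     # make sures index is not repeated
--     already_used = []
--     for i in range(len(a_string)):
--         # formula to jumble
--         letter = ((a * i) + b) % l
--         # checks to make sure the letter index has not already been used
--         if letter not in already_used:
--             # adds to already used list
--             already_used.append(letter)
--             # adds to the new word
--             new_string += a_string[letter]
--
--     return new_string
-- ===== SOURCE B (Python) =====
-- def jumble(a_string, a, b):
--     l = len(a_string)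
--     if l == 0:
--         return ""
--     # Euclid's algorithm: g = gcd(l, abs(a))
--     g, x = l, abs(a) % l
--     while x:
--         g, x = x, g % x
--     # period of the index sequence (a*i + b) % l: after p steps it repeats
--     p = l // g
--     return ''.join(a_string[(a * i + b) % l] for i in range(p))
-- ===== Notes on version B (the rewrite author's own statement) =====
-- stated objective: faster
-- what changed: Replaces the dedup loop with already_used membership scans by a closed form: the index sequence (a*i+b)%l has period p = l/gcd(|a|,l) and its first p values are exactly the distinct first-appearance indices, so B emits a_string[(a*i+b)%l] for i in range(p) with no dedup structure at all.
import Mathlib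
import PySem

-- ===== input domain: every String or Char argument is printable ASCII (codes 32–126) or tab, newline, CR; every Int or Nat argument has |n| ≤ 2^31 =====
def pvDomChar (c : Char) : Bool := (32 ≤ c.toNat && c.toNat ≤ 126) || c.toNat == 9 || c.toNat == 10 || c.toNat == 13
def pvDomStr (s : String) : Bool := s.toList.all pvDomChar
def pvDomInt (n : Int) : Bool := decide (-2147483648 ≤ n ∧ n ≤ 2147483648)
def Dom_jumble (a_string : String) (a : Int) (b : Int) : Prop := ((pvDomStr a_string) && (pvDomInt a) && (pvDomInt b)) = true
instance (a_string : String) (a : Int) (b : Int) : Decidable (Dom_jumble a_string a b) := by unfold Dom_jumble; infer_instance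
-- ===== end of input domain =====

-- B replaces A's dedup loop (membership list) by the closed-form period p = l / gcd(|a|, l)
-- of the index sequence (a*i+b) % l, emitting exactly the first p indices directly.

-- ===== PORT A =====
-- one loop iteration of A: letter = (a*i+b) % l; dedup via the already_used list
-- (a_string[letter] is always in range when the loop body runs, so .getD ' ' is never the default)
def jumbleStep (s : List Char) (a b l : Int) (st : List Char × List Int) (i : Int) :
    List Char × List Int :=
  let letter := PySem.Int.mod (a * i + b) l
  if letter ∈ st.2 then st
  else (st.1 ++ [(PySem.List.pyGet? s letter).getD ' '], st.2 ++ [letter])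

def jumble (a_string : String) (a : Int) (b : Int) : String :=
  let s := a_string.toList
  let l : Int := (s.length : Int)
  let res := (PySem.List.pyRange 0 l 1).foldl (jumbleStep s a b l) ([], [])
  String.ofList res.1

-- ===== PORT B =====
-- Euclid's algorithm from Source B: g, x = l, abs(a) % l; while x: g, x = x, g % x
def euclidAux (g : Nat) (x : Nat) : Nat :=
  if h : x = 0 then g else euclidAux x (g % x)
termination_by x
decreasing_by exact Nat.mod_lt _ (Nat.pos_of_ne_zero h)

def jumble_alt (a_string : String) (a : Int) (b : Int) : String :=
  let s := a_string.toList
  let n := s.length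
  if n = 0 then "" else
    let g := euclidAux n (a.natAbs % n)
    let p := n / g
    String.ofList ((List.range p).map (fun (j : Nat) =>
      (PySem.List.pyGet? s (PySem.Int.mod (a * (j : Int) + b) (n : Int))).getD ' '))

-- ===== PRECONDITION & SPEC =====
def Spec_jumble (a_string : String) (a : Int) (b : Int) (out : String) : Prop := out = jumble_alt a_string a b
instance (a_string : String) (a : Int) (b : Int) (out : String) : Decidable (Spec_jumble a_string a b out) := by unfold Spec_jumble; infer_instance

-- ===== CLAIM (what is proved, stated in full; the proofs are below) =====
def Claim_equal_jumble : Prop := ∀ (a_string : String) (a : Int) (b : Int), Dom_jumble a_string a b → Spec_jumble a_string a b (jumble a_string a b)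

-- ===== LEMMAS AND PROOFS =====

-- the index map of both programs
def jidx (a b l : Int) (j : Nat) : Int := PySem.Int.mod (a * (j : Int) + b) l

lemma euclid_eq_gcd : ∀ (x g : Nat), euclidAux g x = Nat.gcd x g := by
  intro x
  induction x using Nat.strong_induction_on with
  | _ x ih =>
    intro g
    rw [euclidAux]
    by_cases h : x = 0
    · simp [h]
    · rw [dif_neg h, ih (g % x) (Nat.mod_lt _ (Nat.pos_of_ne_zero h)) x]
      exact (Nat.gcd_rec x g).symm

-- core number theory: n ∣ a*d ↔ (n / gcd(|a|,n)) ∣ d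
lemma key_dvd (a : Int) (n : Nat) (hn : 0 < n) (d : Int) :
    ((n : Int) ∣ a * d) ↔ ((n / Nat.gcd a.natAbs n : Nat) : Int) ∣ d := by
  set g : Nat := Nat.gcd a.natAbs n with hgdef
  have hg0 : 0 < g := Nat.gcd_pos_of_pos_right _ hn
  have hgn : g ∣ n := Nat.gcd_dvd_right _ _
  have hGa : (g : Int) ∣ a := by
    have h1 : (g : Int) ∣ (a.natAbs : Int) := Int.ofNat_dvd.mpr (Nat.gcd_dvd_left _ _)
    exact Int.dvd_natAbs.mp h1
  have hG0 : (g : Int) ≠ 0 := by exact_mod_cast hg0.ne'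
  set p : Nat := n / g with hpdef
  have hnp : (n : Int) = (g : Int) * (p : Int) := by
    have := Nat.mul_div_cancel' hgn
    exact_mod_cast this.symm
  set a' : Int := a / (g : Int) with ha'def
  have ha : a = (g : Int) * a' := (Int.mul_ediv_cancel' hGa).symm
  have hgint : Int.gcd a (n : Int) = g := by
    simp [Int.gcd, hgdef]
  have hcop : IsCoprime ((p : Int)) a' := by
    rw [Int.isCoprime_iff_gcd_eq_one, Int.gcd_comm]
    have h := Int.gcd_div_gcd_div_gcd (i := a) (j := (n : Int)) (by rw [hgint]; exact hg0)
    rw [hgint] at h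
    have hpn : ((n : Int)) / (g : Int) = (p : Int) := by
      rw [hnp]
      exact Int.mul_ediv_cancel_left _ hG0
    rw [hpn] at h
    exact h
  constructor
  · intro h
    rw [hnp, ha] at h
    have h2 : (p : Int) ∣ a' * d := by
      have h3 : (g : Int) * a' * d = (g : Int) * (a' * d) := by ring
      rw [h3] at h
      exact (mul_dvd_mul_iff_left hG0).mp h
    exact hcop.dvd_of_dvd_mul_left h2
  · intro h
    obtain ⟨c, rfl⟩ := h
    exact ⟨a' * c, by rw [hnp, ha]; ring⟩

lemma jidx_eq_iff (a b : Int) (n : Nat) (hn : 0 < n) (i j : Nat) :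
    jidx a b (n : Int) i = jidx a b (n : Int) j ↔
      ((n / Nat.gcd a.natAbs n : Nat) : Int) ∣ (i : Int) - (j : Int) := by
  have hn' : (0 : Int) < (n : Int) := by exact_mod_cast hn
  unfold jidx
  rw [PySem.Int.mod_eq_emod_of_pos hn', PySem.Int.mod_eq_emod_of_pos hn']
  rw [Int.emod_eq_emod_iff_emod_sub_eq_zero, PySem.Int.emod_eq_zero_iff_dvd]
  have h1 : a * (i : Int) + b - (a * (j : Int) + b) = a * ((i : Int) - (j : Int)) := by ring
  rw [h1, key_dvd a n hn]

-- loop invariant: folding A's step over range k collects exactly the first min k p letters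
lemma fold_dedup (s : List Char) (a b : Int) (p : Nat)
    (hinj : ∀ i j, i < p → j < p →
      jidx a b (s.length : Int) i = jidx a b (s.length : Int) j → i = j)
    (hper : ∀ k, p ≤ k → ∃ j, j < p ∧ jidx a b (s.length : Int) j = jidx a b (s.length : Int) k) :
    ∀ k, (List.range k).foldl (fun (st : List Char × List Int) (j : Nat) => jumbleStep s a b (s.length : Int) st (j : Int)) ([], [])
      = ((List.range (min k p)).map (fun j => (PySem.List.pyGet? s (jidx a b (s.length : Int) j)).getD ' '),
         (List.range (min k p)).map (jidx a b (s.length : Int))) := by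
  intro k
  induction k with
  | zero => simp
  | succ k ih =>
    rw [List.range_succ, List.foldl_append, ih]
    have hstep : ∀ st : List Char × List Int,
        jumbleStep s a b (s.length : Int) st (k : Int) =
          if jidx a b (s.length : Int) k ∈ st.2 then st
          else (st.1 ++ [(PySem.List.pyGet? s (jidx a b (s.length : Int) k)).getD ' '],
                st.2 ++ [jidx a b (s.length : Int) k]) := fun _ => rfl
    by_cases hk : k < p
    · have hmin : min k p = k := by omega
      have hnot : jidx a b (s.length : Int) k ∉ (List.range (min k p)).map (jidx a b (s.length : Int)) := by
        rw [hmin]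
        intro hmem
        obtain ⟨j, hj, hfj⟩ := List.mem_map.mp hmem
        have hj' := List.mem_range.mp hj
        exact absurd (hinj j k (by omega) hk hfj) (by omega)
      simp only [List.foldl_cons, List.foldl_nil, hstep, if_neg hnot]
      have hmin' : min (k+1) p = k + 1 := by omega
      rw [hmin, hmin', List.range_succ, List.map_append, List.map_append]
      simp
    · have hmin : min k p = p := by omega
      obtain ⟨j, hj, hfj⟩ := hper k (by omega)
      have hmem : jidx a b (s.length : Int) k ∈ (List.range (min k p)).map (jidx a b (s.length : Int)) := by
        rw [hmin]
        exact List.mem_map.mpr ⟨j, List.mem_range.mpr hj, hfj⟩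
      simp only [List.foldl_cons, List.foldl_nil, hstep, if_pos hmem]
      have hmin' : min (k+1) p = p := by omega
      rw [hmin, hmin']

-- ===== VERDICT (by name: the statement is the Claim_ definition above) =====
-- injectivity of jidx on [0, p) and periodicity with period p
lemma jidx_inj (a b : Int) (n : Nat) (hn : 0 < n) :
    ∀ i j, i < n / Nat.gcd a.natAbs n → j < n / Nat.gcd a.natAbs n →
      jidx a b (n : Int) i = jidx a b (n : Int) j → i = j := by
  intro i j hi hj heq
  set p : Nat := n / Nat.gcd a.natAbs n with hpdef
  have hdvd : ((p : Nat) : Int) ∣ (i : Int) - (j : Int) := (jidx_eq_iff a b n hn i j).mp heq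
  by_contra hne
  have habs : (0 : Int) < |(i : Int) - (j : Int)| := by
    rw [abs_pos]
    intro h0
    exact hne (by exact_mod_cast (by omega : (i : Int) = j))
  have hle : ((p : Nat) : Int) ≤ |(i : Int) - (j : Int)| :=
    Int.le_of_dvd habs ((dvd_abs _ _).mpr hdvd)
  have : |(i : Int) - (j : Int)| < (p : Int) := by
    rw [abs_lt]
    constructor <;> [omega; omega]
  omega

lemma jidx_per (a b : Int) (n : Nat) (hn : 0 < n) (hp : 0 < n / Nat.gcd a.natAbs n) :
    ∀ k, n / Nat.gcd a.natAbs n ≤ k →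
      ∃ j, j < n / Nat.gcd a.natAbs n ∧ jidx a b (n : Int) j = jidx a b (n : Int) k := by
  intro k hk
  set p : Nat := n / Nat.gcd a.natAbs n with hpdef
  refine ⟨k % p, Nat.mod_lt _ hp, ?_⟩
  rw [jidx_eq_iff a b n hn]
  refine ⟨-((k / p : Nat) : Int), ?_⟩
  have hdm : p * (k / p) + k % p = k := Nat.div_add_mod k p
  have hdm' : (p : Int) * ((k / p : Nat) : Int) + ((k % p : Nat) : Int) = (k : Int) := by
    exact_mod_cast hdm
  linarith

theorem jumble_spec : Claim_equal_jumble := by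
  unfold Claim_equal_jumble Spec_jumble
  intro a_string a b _
  unfold jumble jumble_alt
  dsimp only
  set s := a_string.toList with hs
  by_cases h0 : s.length = 0
  · rw [if_pos h0, h0]
    rw [PySem.List.pyRange_one_eq_nil (by simp)]
    simp
  · have hn : 0 < s.length := Nat.pos_of_ne_zero h0
    -- identify B's gcd with Nat.gcd
    have hgcd : euclidAux s.length (a.natAbs % s.length) = Nat.gcd a.natAbs s.length := by
      rw [euclid_eq_gcd]
      rw [← Nat.gcd_rec, Nat.gcd_comm]
    have hG0 : 0 < Nat.gcd a.natAbs s.length := Nat.gcd_pos_of_pos_right _ hn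
    have hp : 0 < s.length / Nat.gcd a.natAbs s.length :=
      Nat.div_pos (Nat.le_of_dvd hn (Nat.gcd_dvd_right _ _)) hG0
    have hpn : s.length / Nat.gcd a.natAbs s.length ≤ s.length := Nat.div_le_self _ _
    -- A's side: rewrite the pyRange fold into a fold over List.range
    have hrange : PySem.List.pyRange 0 (s.length : Int) 1
        = (List.range s.length).map (fun k => ((k : Nat) : Int)) := by
      rw [PySem.List.pyRange_one]
      simp
    rw [if_neg h0, hrange, List.foldl_map]
    have hfold := fold_dedup s a b (s.length / Nat.gcd a.natAbs s.length)
      (jidx_inj a b s.length hn) (jidx_per a b s.length hn hp) s.length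
    rw [hfold]
    have hminnp : min s.length (s.length / Nat.gcd a.natAbs s.length)
        = s.length / Nat.gcd a.natAbs s.length := by omega
    rw [hminnp, hgcd]
    rfl
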